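-- pv_equiv track=rewrite | github.com/avishekchy45/Bio-informatics-LAB-TASKS | partial_digest_algorithm.py | place_point
-- ===== SOURCE A (Python) =====
-- from collections import Counter
--
-- def remove_distances(D, distances):
--     D_count = Counter(D)  # Multiset behavior using Counter
--     for d in distances:
--         if D_count[d] > 0:
--             D_count[d] -= 1
--         else:
--             return None  # If we can't remove the required distance, return None
--     return list(D_count.elements())  # Return the remaining multiset as a list
--
-- def place_point(D, positions, L):
--     if not D:
--         return positions  # If D is empty, we've placed all points correctly
--
--     max_dist = max(D)  # The largest remaining distance in D
--
--     # Try placing a new point at max_dist from 0 (right side placement)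
--     possible_point = max_dist
--     new_distances = [abs(possible_point - p) for p in positions]
--     new_D = remove_distances(D, new_distances)
--
--     if new_D is not None:
--         positions.append(possible_point)
--         result = place_point(new_D, positions, L)
--         if result:
--             return result
--         positions.pop()  # Backtrack if placing at max_dist didn't work
--
--     # Try placing the new point at L - max_dist (left side placement)
--     possible_point = L - max_dist
--     new_distances = [abs(possible_point - p) for p in positions]
--     new_D = remove_distances(D, new_distances)
--
--     if new_D is not None:
--         positions.append(possible_point)
--         result = place_point(new_D, positions, L)
--         if result:
--             return result
--         positions.pop()  # Backtrack if placing at L - max_dist didn't work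
--
--     return None  # If neither placement worked, return None
-- ===== SOURCE B (Python) =====
-- from collections import Counter
--
--
-- def place_point(D, positions, L):
--     # Iterative explicit-stack DFS instead of A's recursion; equivalence is about the
--     # RETURN value (A mutates `positions` in place, B works on a copy).
--     def shrink(ds, pt, pos):
--         # remove |pt - q| for each placed q from the multiset ds, or None if impossible
--         c = Counter(ds)
--         for q in pos:
--             d = abs(pt - q)
--             if c[d] <= 0:
--                 return None
--             c[d] -= 1
--         return list(c.elements())
--
--     pos = list(positions)
--     # frame = [remaining multiset, next branch to try (0: max, 1: L-max), appended?]
--     stack = [[list(D), 0, False]]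
--     while stack:
--         frame = stack[-1]
--         ds, branch, appended = frame
--         if not ds:
--             return pos
--         if branch >= 2:
--             stack.pop()
--             if appended:
--                 pos.pop()
--             continue
--         frame[1] = branch + 1
--         m = max(ds)
--         pt = m if branch == 0 else L - m
--         rest = shrink(ds, pt, pos)
--         if rest is not None:
--             pos.append(pt)
--             stack.append([rest, 0, True])
--     return None
-- ===== Notes on version B (the rewrite author's own statement) =====
-- stated objective: alternative
-- what changed: B replaces A's recursive backtracking with an explicit-stack iterative DFS (frames carry the remaining multiset and a branch counter, with push/advance/pop transitions), and replaces A's build-a-distance-list-then-remove helper with a single per-position Counter decrement pass.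
import Mathlib
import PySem

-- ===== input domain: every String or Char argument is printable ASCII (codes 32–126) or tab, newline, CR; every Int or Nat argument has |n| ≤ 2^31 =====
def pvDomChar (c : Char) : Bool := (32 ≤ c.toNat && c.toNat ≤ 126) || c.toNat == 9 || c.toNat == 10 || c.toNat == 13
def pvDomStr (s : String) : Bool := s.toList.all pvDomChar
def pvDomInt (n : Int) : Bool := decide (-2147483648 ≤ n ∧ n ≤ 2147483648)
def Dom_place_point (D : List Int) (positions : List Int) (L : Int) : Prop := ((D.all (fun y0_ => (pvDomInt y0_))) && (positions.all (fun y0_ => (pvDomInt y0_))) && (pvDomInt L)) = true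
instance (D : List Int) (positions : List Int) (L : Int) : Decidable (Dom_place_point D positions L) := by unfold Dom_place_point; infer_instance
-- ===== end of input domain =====

-- B replaces A's recursion by an explicit-stack iterative DFS (frames = remaining multiset,
-- next branch, appended?) and its build-distance-list-then-remove helper by a per-position
-- Counter decrement pass; equivalence is about the RETURN value only (A appends/pops on
-- `positions` in place, B works on a copy).

-- ===== PORT A =====
-- one step of the `for d in distances` loop inside remove_distances (early `return None` = none state)
def rstep (acc : Option (PySem.Dict Int Int)) (d : Int) : Option (PySem.Dict Int Int) :=
  match acc with
  | none => none
  | some c => if c.getD d 0 > 0 then some (c.insert d (c.getD d 0 - 1)) else none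

def remove_distances (D distances : List Int) : Option (List Int) :=
  match distances.foldl rstep (some (PySem.Dict.counter D)) with
  | none => none
  | some c => some (c.items.flatMap (fun kv => List.replicate kv.2.toNat kv.1))

-- the recursion, made total with fuel (D.length + 2 bounds the recursion depth; a pure totality guard)
def goA : Nat → List Int → List Int → Int → Option (List Int)
  | 0, _, _, _ => none
  | fuel+1, D, positions, L =>
    if D = [] then some positions
    else
      match PySem.List.max? D (fun x => x) with
      | none => none   -- unreachable: D ≠ []
      | some max_dist =>
        let first :=
          match remove_distances D (positions.map (fun p => |max_dist - p|)) with
          | none => none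
          | some newD =>
            match goA fuel newD (positions ++ [max_dist]) L with
            | none => none
            | some r => if r = [] then none else some r   -- Python's `if result:` truthiness
        match first with
        | some r => some r
        | none =>
          let possible_point := L - max_dist
          match remove_distances D (positions.map (fun p => |possible_point - p|)) with
          | none => none
          | some newD =>
            match goA fuel newD (positions ++ [possible_point]) L with
            | none => none
            | some r => if r = [] then none else some r

def place_point (D : List Int) (positions : List Int) (L : Int) : Option (List Int) :=
  goA (D.length + 2) D positions L

-- ===== PORT B =====
-- one step of shrink's `for q in pos` loop (early `return None` = none state)
def bstep (pt : Int) (acc : Option (PySem.Dict Int Int)) (q : Int) : Option (PySem.Dict Int Int) :=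
  match acc with
  | none => none
  | some c =>
    let d := |pt - q|
    if c.getD d 0 ≤ 0 then none else some (c.insert d (c.getD d 0 - 1))

def shrink (ds : List Int) (pt : Int) (pos : List Int) : Option (List Int) :=
  match pos.foldl (bstep pt) (some (PySem.Dict.counter ds)) with
  | none => none
  | some c => some (c.items.flatMap (fun kv => List.replicate kv.2.toNat kv.1))

-- the `while stack:` loop; a frame is (remaining multiset, next branch to try, appended?).
-- Fuel is a pure totality guard (the Python loop always terminates; the chosen fuel is enough).
def runB : Nat → List (List Int × Nat × Bool) → List Int → Int → Option (List Int)
  | 0, _, _, _ => none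
  | fuel+1, stack, pos, L =>
    match stack with
    | [] => none
    | (ds, branch, appended) :: rest =>
      if ds = [] then some pos
      else if 2 ≤ branch then
        runB fuel rest (if appended then pos.dropLast else pos) L
      else
        match PySem.List.max? ds (fun x => x) with
        | none => none   -- unreachable: ds ≠ []
        | some m =>
          let pt := if branch = 0 then m else L - m
          match shrink ds pt pos with
          | none => runB fuel ((ds, branch + 1, appended) :: rest) pos L
          | some rest' =>
            runB fuel ((rest', 0, true) :: (ds, branch + 1, appended) :: rest) (pos ++ [pt]) L

def place_point_alt (D : List Int) (positions : List Int) (L : Int) : Option (List Int) :=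
  runB (3 * 2 ^ (D.length + 3)) [(D, 0, false)] positions L

-- ===== PRECONDITION & SPEC =====
def Spec_place_point (D : List Int) (positions : List Int) (L : Int) (out : Option (List Int)) : Prop := out = place_point_alt D positions L
instance (D : List Int) (positions : List Int) (L : Int) (out : Option (List Int)) : Decidable (Spec_place_point D positions L out) := by unfold Spec_place_point; infer_instance

-- ===== CLAIM (what is proved, stated in full; the proofs are below) =====
def Claim_equal_place_point : Prop := ∀ (D : List Int) (positions : List Int) (L : Int), Dom_place_point D positions L → Spec_place_point D positions L (place_point D positions L)

-- ===== LEMMAS AND PROOFS =====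

theorem bstep_eq (pt : Int) (acc : Option (PySem.Dict Int Int)) (q : Int) :
    bstep pt acc q = rstep acc (|pt - q|) := by
  cases acc with
  | none => rfl
  | some c =>
    simp only [bstep, rstep]
    split_ifs with h1 h2 <;> first | rfl | omega

theorem shrink_eq (ds : List Int) (pt : Int) (pos : List Int) :
    shrink ds pt pos = remove_distances ds (pos.map (fun q => |pt - q|)) := by
  unfold shrink remove_distances
  rw [List.foldl_map]
  have hfn : bstep pt = fun acc q => rstep acc (|pt - q|) := by
    funext acc q; exact bstep_eq pt acc q
  rw [hfn]

theorem rfold_none (nd : List Int) : nd.foldl rstep none = none := by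
  induction nd with
  | nil => rfl
  | cons d t ih => simpa [rstep] using ih

-- sum of values drops by one when the (unique) entry at key d is decremented
theorem sum_map_update (l : List (Int × Int)) (d v : Int) (hv : 0 < v)
    (hnd : (l.map Prod.fst).Nodup) (hmem : (d, v) ∈ l) :
    ((l.map (fun p => if p.1 == d then (d, v - 1) else p)).map (fun kv => kv.2.toNat)).sum + 1
      = (l.map (fun kv => kv.2.toNat)).sum := by
  induction l with
  | nil => cases hmem
  | cons a t ih =>
    rw [List.map_cons] at hnd
    obtain ⟨hhead, hnd'⟩ := List.nodup_cons.mp hnd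
    rcases List.mem_cons.mp hmem with heq | hmem'
    · subst heq
      have hmap : t.map (fun p => if p.1 == d then (d, v - 1) else p) = t := by
        rw [List.map_congr_left (g := id), List.map_id]
        intro p hp
        have hpd : ¬ (p.1 == d) = true := by
          intro hb
          exact hhead (by
            have : p.1 = (d, v).1 := by simpa using hb
            exact this ▸ List.mem_map_of_mem hp)
        simp [hpd]
      simp only [List.map_cons, List.sum_cons, hmap]
      have hh : ((d, v).1 == d) = true := by simp
      rw [if_pos hh]
      simp only []
      omega
    · have hne : ¬ (a.1 == d) = true := by
        intro hb
        have had : a.1 = d := by simpa using hb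
        exact hhead (had ▸ List.mem_map_of_mem (f := Prod.fst) hmem')
      rw [List.map_cons, if_neg hne, List.map_cons, List.sum_cons, List.map_cons, List.sum_cons]
      have := ih hnd' hmem'
      omega

theorem rfold_len : ∀ (nd : List Int) (c c' : PySem.Dict Int Int), c.keys.Nodup →
    nd.foldl rstep (some c) = some c' →
    (c'.items.map (fun kv => kv.2.toNat)).sum + nd.length
      = (c.items.map (fun kv => kv.2.toNat)).sum := by
  intro nd
  induction nd with
  | nil =>
    intro c c' _ h
    cases h
    simp
  | cons d t ih =>
    intro c c' hnd h
    by_cases hpos : c.getD d 0 > 0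
    · have hstep : (d :: t).foldl rstep (some c)
          = t.foldl rstep (some (c.insert d (c.getD d 0 - 1))) := by
        simp [rstep, hpos]
      rw [hstep] at h
      have hcont : c.contains d = true := by
        by_contra hc
        have hc' : c.contains d = false := by simpa using hc
        have := PySem.Dict.getD_of_not_contains c 0 hc'
        omega
      have hkeys : (c.insert d (c.getD d 0 - 1)).keys = c.keys :=
        PySem.Dict.keys_insert_of_contains c _ hcont
      have hmem : (d, c.getD d 0) ∈ c.items := by
        have hsome : (c.get? d).isSome := by
          rw [← PySem.Dict.contains_eq_isSome_get?, hcont]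
        obtain ⟨w, hw⟩ := Option.isSome_iff_exists.mp hsome
        have : c.getD d 0 = w := PySem.Dict.getD_of_get?_eq_some c 0 hw
        rw [this]
        exact PySem.Dict.mem_items_of_get?_eq_some c hw
      have hitems : (c.insert d (c.getD d 0 - 1)).items
          = c.items.map (fun p => if p.1 == d then (d, c.getD d 0 - 1) else p) :=
        PySem.Dict.items_insert_of_contains c _ hcont
      have hkeys_nodup : (c.items.map Prod.fst).Nodup := by
        simpa [PySem.Dict.keys] using hnd
      have hsum := sum_map_update c.items d (c.getD d 0) hpos hkeys_nodup hmem
      have hih := ih (c.insert d (c.getD d 0 - 1)) c' (hkeys ▸ hnd) h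
      rw [hitems] at hih
      simp only [List.length_cons]
      omega
    · have hstep : (d :: t).foldl rstep (some c) = none := by
        simp [rstep, hpos, rfold_none]
      rw [hstep] at h
      cases h

theorem counter_sum (ds : List Int) :
    ((PySem.Dict.counter ds).items.map (fun kv => kv.2.toNat)).sum = ds.length := by
  rw [PySem.Dict.items_counter, List.map_map]
  have hperm : (PySem.Set.ofList ds).Perm ds.dedup := by
    refine (List.perm_ext_iff_of_nodup (PySem.Set.nodup_ofList ds) ds.nodup_dedup).mpr ?_
    intro x
    rw [PySem.Set.mem_ofList, List.mem_dedup]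
  have := (hperm.map (fun k => ((fun kv : Int × Int => kv.2.toNat) ∘ fun k => (k, (ds.count k : Int))) k)).sum_eq
  rw [this]
  simp only [Function.comp]
  have : (ds.dedup.map fun k => ((ds.count k : Int)).toNat) = ds.dedup.map fun k => ds.count k := by
    apply List.map_congr_left
    intro x _
    exact Int.toNat_natCast _
  rw [this]
  exact List.sum_map_count_dedup_eq_length ds

theorem remove_len (ds nd r : List Int) (h : remove_distances ds nd = some r) :
    r.length + nd.length = ds.length := by
  unfold remove_distances at h
  cases hf : nd.foldl rstep (some (PySem.Dict.counter ds)) with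
  | none => rw [hf] at h; cases h
  | some c' =>
    rw [hf] at h
    cases h
    have hlen := rfold_len nd (PySem.Dict.counter ds) c' (PySem.Dict.nodup_keys_counter ds) hf
    rw [counter_sum] at hlen
    rw [List.length_flatMap]
    simpa using hlen

theorem goA_length (f : Nat) : ∀ (ds pos : List Int) (L : Int) (r : List Int),
    goA f ds pos L = some r → pos.length ≤ r.length := by
  induction f with
  | zero => intro ds pos L r h; cases h
  | succ f ih =>
    intro ds pos L r h
    by_cases hds : ds = []
    · subst hds
      simp only [goA] at h
      cases h
      exact le_refl _
    · simp only [goA, if_neg hds] at h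
      cases hmax : PySem.List.max? ds (fun x => x) with
      | none => rw [hmax] at h; cases h
      | some m =>
        rw [hmax] at h
        simp only at h
        cases h1 : remove_distances ds (pos.map (fun p => |m - p|)) with
        | none =>
          rw [h1] at h
          simp only at h
          cases h2 : remove_distances ds (pos.map (fun p => |L - m - p|)) with
          | none => rw [h2] at h; cases h
          | some nd2 =>
            rw [h2] at h
            simp only at h
            cases h3 : goA f nd2 (pos ++ [L - m]) L with
            | none => rw [h3] at h; cases h
            | some r2 =>
              rw [h3] at h
              simp only at h
              split at h
              · cases h
              · cases h
                have := ih nd2 (pos ++ [L - m]) L r h3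
                simpa using Nat.le_of_succ_le (by simpa using this)
        | some nd1 =>
          rw [h1] at h
          simp only at h
          cases h3 : goA f nd1 (pos ++ [m]) L with
          | none =>
            rw [h3] at h
            simp only at h
            cases h2 : remove_distances ds (pos.map (fun p => |L - m - p|)) with
            | none => rw [h2] at h; cases h
            | some nd2 =>
              rw [h2] at h
              simp only at h
              cases h4 : goA f nd2 (pos ++ [L - m]) L with
              | none => rw [h4] at h; cases h
              | some r2 =>
                rw [h4] at h
                simp only at h
                split at h
                · cases h
                · cases h
                  have := ih nd2 (pos ++ [L - m]) L r h4
                  simpa using Nat.le_of_succ_le (by simpa using this)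
          | some r1 =>
            rw [h3] at h
            simp only at h
            by_cases hnil : r1 = []
            · rw [if_pos hnil] at h
              simp only at h
              cases h2 : remove_distances ds (pos.map (fun p => |L - m - p|)) with
              | none => rw [h2] at h; cases h
              | some nd2 =>
                rw [h2] at h
                simp only at h
                cases h4 : goA f nd2 (pos ++ [L - m]) L with
                | none => rw [h4] at h; cases h
                | some r2 =>
                  rw [h4] at h
                  simp only at h
                  split at h
                  · cases h
                  · cases h
                    have := ih nd2 (pos ++ [L - m]) L r h4
                    simpa using Nat.le_of_succ_le (by simpa using this)
            · rw [if_neg hnil] at h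
              simp only at h
              cases h
              have := ih nd1 (pos ++ [m]) L r h3
              simpa using Nat.le_of_succ_le (by simpa using this)

theorem runB_nil (fuel : Nat) (pos : List Int) (L : Int) : runB fuel [] pos L = none := by
  cases fuel <;> rfl

theorem runB_step0n (fuel : Nat) (ds pos : List Int) (L m : Int)
    (rest : List (List Int × Nat × Bool)) (ap : Bool)
    (hds : ds ≠ []) (hmax : PySem.List.max? ds (fun x => x) = some m)
    (hs : shrink ds m pos = none) :
    runB (fuel + 1) ((ds, 0, ap) :: rest) pos L = runB fuel ((ds, 1, ap) :: rest) pos L := by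
  simp [runB, hds, hmax, hs]

theorem runB_step0s (fuel : Nat) (ds pos nd : List Int) (L m : Int)
    (rest : List (List Int × Nat × Bool)) (ap : Bool)
    (hds : ds ≠ []) (hmax : PySem.List.max? ds (fun x => x) = some m)
    (hs : shrink ds m pos = some nd) :
    runB (fuel + 1) ((ds, 0, ap) :: rest) pos L
      = runB fuel ((nd, 0, true) :: (ds, 1, ap) :: rest) (pos ++ [m]) L := by
  simp [runB, hds, hmax, hs]

theorem runB_step1n (fuel : Nat) (ds pos : List Int) (L m : Int)
    (rest : List (List Int × Nat × Bool)) (ap : Bool)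
    (hds : ds ≠ []) (hmax : PySem.List.max? ds (fun x => x) = some m)
    (hs : shrink ds (L - m) pos = none) :
    runB (fuel + 1) ((ds, 1, ap) :: rest) pos L = runB fuel ((ds, 2, ap) :: rest) pos L := by
  simp [runB, hds, hmax, hs]

theorem runB_step1s (fuel : Nat) (ds pos nd : List Int) (L m : Int)
    (rest : List (List Int × Nat × Bool)) (ap : Bool)
    (hds : ds ≠ []) (hmax : PySem.List.max? ds (fun x => x) = some m)
    (hs : shrink ds (L - m) pos = some nd) :
    runB (fuel + 1) ((ds, 1, ap) :: rest) pos L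
      = runB fuel ((nd, 0, true) :: (ds, 2, ap) :: rest) (pos ++ [L - m]) L := by
  simp [runB, hds, hmax, hs]

theorem runB_step2 (fuel : Nat) (ds pos : List Int) (L : Int)
    (rest : List (List Int × Nat × Bool)) (ap : Bool) (hds : ds ≠ []) :
    runB (fuel + 1) ((ds, 2, ap) :: rest) pos L =
      runB fuel rest (if ap then pos.dropLast else pos) L := by
  simp [runB, hds]

theorem child_inv (f : Nat) (ds pos nd : List Int) (g : Int → Int)
    (hinv : ds.length + 2 ≤ (f + 1) + min pos.length 1)
    (hrm : remove_distances ds (pos.map g) = some nd) (pt : Int) :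
    nd.length + 2 ≤ f + min (pos ++ [pt]).length 1 := by
  have hlen := remove_len ds (pos.map g) nd hrm
  rw [List.length_map] at hlen
  rw [List.length_append, List.length_singleton]
  omega

theorem sim (f : Nat) : ∀ (ds pos : List Int) (L : Int),
    ds.length + 2 ≤ f + min pos.length 1 →
    ∃ k, k + 3 ≤ 3 * 2 ^ f ∧ ∀ (fuel : Nat) (rest : List (List Int × Nat × Bool)) (ap : Bool),
      runB (fuel + k) ((ds, 0, ap) :: rest) pos L =
        match goA f ds pos L with
        | some r => some r
        | none => runB fuel rest (if ap then pos.dropLast else pos) L := by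
  induction f with
  | zero =>
    intro ds pos L hinv
    exfalso
    omega
  | succ f ih =>
    have hpow : 2 ^ (f + 1) = 2 * 2 ^ f := by rw [pow_succ]; ring
    have hpow1 : 1 ≤ 2 ^ f := Nat.one_le_two_pow
    intro ds pos L hinv
    by_cases hds : ds = []
    · subst hds
      refine ⟨1, by omega, ?_⟩
      intro fuel rest ap
      simp [runB, goA]
    · cases hmax : PySem.List.max? ds (fun x => x) with
      | none => exact absurd ((PySem.List.max?_eq_none_iff ds _).mp hmax) hds
      | some m =>
        cases hs1 : shrink ds m pos with
        | none =>
          have hA1 : remove_distances ds (pos.map (fun p => |m - p|)) = none := by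
            rw [← shrink_eq]; exact hs1
          cases hs2 : shrink ds (L - m) pos with
          | none =>
            have hA2 : remove_distances ds (pos.map (fun p => |L - m - p|)) = none := by
              rw [← shrink_eq]; exact hs2
            have hgoA : goA (f + 1) ds pos L = none := by
              simp only [goA, hmax, if_neg hds, hA1, hA2]
            refine ⟨3, by omega, ?_⟩
            intro fuel rest ap
            have e0 : fuel + 3 = (fuel + 2) + 1 := by omega
            rw [e0, runB_step0n _ _ _ _ _ _ _ hds hmax hs1]
            have e1 : fuel + 2 = (fuel + 1) + 1 := by omega
            rw [e1, runB_step1n _ _ _ _ _ _ _ hds hmax hs2]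
            rw [runB_step2 _ _ _ _ _ _ hds, hgoA]
          | some nd2 =>
            have hA2 : remove_distances ds (pos.map (fun p => |L - m - p|)) = some nd2 := by
              rw [← shrink_eq]; exact hs2
            obtain ⟨k2, hk2, h2⟩ := ih nd2 (pos ++ [L - m]) L
              (child_inv f ds pos nd2 _ hinv hA2 (L - m))
            refine ⟨3 + k2, by omega, ?_⟩
            intro fuel rest ap
            have e0 : fuel + (3 + k2) = (fuel + 2 + k2) + 1 := by omega
            rw [e0, runB_step0n _ _ _ _ _ _ _ hds hmax hs1]
            have e1 : fuel + 2 + k2 = (fuel + 1 + k2) + 1 := by omega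
            rw [e1, runB_step1s _ _ _ _ _ _ _ _ hds hmax hs2]
            have e2 : fuel + 1 + k2 = (fuel + 1) + k2 := by omega
            rw [e2, h2 (fuel + 1) ((ds, 2, ap) :: rest) true]
            cases hg2 : goA f nd2 (pos ++ [L - m]) L with
            | some r =>
              have hrne : r ≠ [] := by
                have := goA_length f nd2 (pos ++ [L - m]) L r hg2
                intro hnil
                rw [hnil] at this
                simp at this
              have hgoA : goA (f + 1) ds pos L = some r := by
                simp only [goA, hmax, if_neg hds, hA1, hA2, hg2, if_neg hrne]
              rw [hgoA]
            | none =>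
              have hgoA : goA (f + 1) ds pos L = none := by
                simp only [goA, hmax, if_neg hds, hA1, hA2, hg2]
              rw [hgoA]
              simp only [if_true, List.dropLast_concat]
              rw [runB_step2 _ _ _ _ _ _ hds]
        | some nd1 =>
          have hA1 : remove_distances ds (pos.map (fun p => |m - p|)) = some nd1 := by
            rw [← shrink_eq]; exact hs1
          obtain ⟨k1, hk1, h1⟩ := ih nd1 (pos ++ [m]) L
            (child_inv f ds pos nd1 _ hinv hA1 m)
          cases hg1 : goA f nd1 (pos ++ [m]) L with
          | some r =>
            have hrne : r ≠ [] := by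
              have := goA_length f nd1 (pos ++ [m]) L r hg1
              intro hnil
              rw [hnil] at this
              simp at this
            have hgoA : goA (f + 1) ds pos L = some r := by
              simp only [goA, hmax, if_neg hds, hA1, hg1, if_neg hrne]
            refine ⟨1 + k1, by omega, ?_⟩
            intro fuel rest ap
            have e0 : fuel + (1 + k1) = (fuel + k1) + 1 := by omega
            rw [e0, runB_step0s _ _ _ _ _ _ _ _ hds hmax hs1]
            rw [h1 fuel ((ds, 1, ap) :: rest) true, hg1, hgoA]
          | none =>
            cases hs2 : shrink ds (L - m) pos with
            | none =>
              have hA2 : remove_distances ds (pos.map (fun p => |L - m - p|)) = none := by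
                rw [← shrink_eq]; exact hs2
              have hgoA : goA (f + 1) ds pos L = none := by
                simp only [goA, hmax, if_neg hds, hA1, hg1, hA2]
              refine ⟨3 + k1, by omega, ?_⟩
              intro fuel rest ap
              have e0 : fuel + (3 + k1) = (fuel + 2 + k1) + 1 := by omega
              rw [e0, runB_step0s _ _ _ _ _ _ _ _ hds hmax hs1]
              have e2 : fuel + 2 + k1 = (fuel + 2) + k1 := by omega
              rw [e2, h1 (fuel + 2) ((ds, 1, ap) :: rest) true, hg1]
              simp only [if_true, List.dropLast_concat]
              have e1 : fuel + 2 = (fuel + 1) + 1 := by omega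
              rw [e1, runB_step1n _ _ _ _ _ _ _ hds hmax hs2]
              rw [runB_step2 _ _ _ _ _ _ hds, hgoA]
            | some nd2 =>
              have hA2 : remove_distances ds (pos.map (fun p => |L - m - p|)) = some nd2 := by
                rw [← shrink_eq]; exact hs2
              obtain ⟨k2, hk2, h2⟩ := ih nd2 (pos ++ [L - m]) L
                (child_inv f ds pos nd2 _ hinv hA2 (L - m))
              refine ⟨3 + k1 + k2, by omega, ?_⟩
              intro fuel rest ap
              have e0 : fuel + (3 + k1 + k2) = (fuel + 2 + k2 + k1) + 1 := by omega
              rw [e0, runB_step0s _ _ _ _ _ _ _ _ hds hmax hs1]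
              have e2 : fuel + 2 + k2 + k1 = (fuel + 2 + k2) + k1 := by omega
              rw [e2, h1 (fuel + 2 + k2) ((ds, 1, ap) :: rest) true, hg1]
              simp only [if_true, List.dropLast_concat]
              have e1 : fuel + 2 + k2 = ((fuel + 1 + k2)) + 1 := by omega
              rw [e1, runB_step1s _ _ _ _ _ _ _ _ hds hmax hs2]
              have e3 : fuel + 1 + k2 = (fuel + 1) + k2 := by omega
              rw [e3, h2 (fuel + 1) ((ds, 2, ap) :: rest) true]
              cases hg2 : goA f nd2 (pos ++ [L - m]) L with
              | some r =>
                have hrne : r ≠ [] := by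
                  have := goA_length f nd2 (pos ++ [L - m]) L r hg2
                  intro hnil
                  rw [hnil] at this
                  simp at this
                have hgoA : goA (f + 1) ds pos L = some r := by
                  simp only [goA, hmax, if_neg hds, hA1, hg1, hA2, hg2, if_neg hrne]
                rw [hgoA]
              | none =>
                have hgoA : goA (f + 1) ds pos L = none := by
                  simp only [goA, hmax, if_neg hds, hA1, hg1, hA2, hg2]
                rw [hgoA]
                simp only [if_true, List.dropLast_concat]
                rw [runB_step2 _ _ _ _ _ _ hds]

-- ===== VERDICT (by name: the statement is the Claim_ definition above) =====
theorem place_point_spec : Claim_equal_place_point := by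
  intro D positions L _
  unfold Spec_place_point place_point place_point_alt
  obtain ⟨k, hk, h⟩ := sim (D.length + 2) D positions L (by omega)
  have hmono : 3 * 2 ^ (D.length + 2) ≤ 3 * 2 ^ (D.length + 3) :=
    Nat.mul_le_mul_left 3 (Nat.pow_le_pow_right (by omega) (by omega))
  have hT : 3 * 2 ^ (D.length + 3) = (3 * 2 ^ (D.length + 3) - k) + k := by omega
  rw [hT, h (3 * 2 ^ (D.length + 3) - k) [] false]
  cases hg : goA (D.length + 2) D positions L with
  | some r => rfl
  | none => rw [runB_nil]
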